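-- pv_equiv track=rewrite | github.com/matiasApprecio/loopy-skills | scripts/agent_context_reader.py | parse_identity_md
-- ===== SOURCE A (Python) =====
-- from typing import Any, Dict, List, Optional
--
-- def parse_identity_md(content: str) -> Dict[str, str]:
--     """Parsea IDENTITY.md."""
--     data = {
--         'name': '',
--         'creature': '',
--         'vibe': '',
--         'emoji': '🤖',
--         'avatar': ''
--     }
--
--     lines = content.split('\n')
--     for line in lines:
--         line = line.strip()
--         if line.startswith('- **Name:**'):
--             data['name'] = line.replace('- **Name:**', '').strip()
--         elif line.startswith('- **Creature:**'):
--             data['creature'] = line.replace('- **Creature:**', '').strip()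
--         elif line.startswith('- **Vibe:**'):
--             data['vibe'] = line.replace('- **Vibe:**', '').strip()
--         elif line.startswith('- **Emoji:**'):
--             data['emoji'] = line.replace('- **Emoji:**', '').strip()
--         elif line.startswith('- **Avatar:**'):
--             data['avatar'] = line.replace('- **Avatar:**', '').strip()
--
--     return data
-- ===== SOURCE B (Python) =====
-- def parse_identity_md(content: str):
--     """Parsea IDENTITY.md: per-field backward search (last matching line wins)."""
--     lines = [l.strip() for l in content.split('\n')]
--
--     def last_value(prefix, default):
--         for line in reversed(lines):
--             if line.startswith(prefix):
--                 return line.replace(prefix, '').strip()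
--         return default
--
--     return {
--         'name': last_value('- **Name:**', ''),
--         'creature': last_value('- **Creature:**', ''),
--         'vibe': last_value('- **Vibe:**', ''),
--         'emoji': last_value('- **Emoji:**', '🤖'),
--         'avatar': last_value('- **Avatar:**', ''),
--     }
-- ===== Notes on version B (the rewrite author's own statement) =====
-- stated objective: alternative
-- what changed: A makes one forward pass over the lines updating a dict through an if/elif ladder; B strips the lines once, then answers each of the five fields independently by scanning the stripped lines backwards for the first (i.e. last) matching prefix, falling back to the field's default.
import Mathlib
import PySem

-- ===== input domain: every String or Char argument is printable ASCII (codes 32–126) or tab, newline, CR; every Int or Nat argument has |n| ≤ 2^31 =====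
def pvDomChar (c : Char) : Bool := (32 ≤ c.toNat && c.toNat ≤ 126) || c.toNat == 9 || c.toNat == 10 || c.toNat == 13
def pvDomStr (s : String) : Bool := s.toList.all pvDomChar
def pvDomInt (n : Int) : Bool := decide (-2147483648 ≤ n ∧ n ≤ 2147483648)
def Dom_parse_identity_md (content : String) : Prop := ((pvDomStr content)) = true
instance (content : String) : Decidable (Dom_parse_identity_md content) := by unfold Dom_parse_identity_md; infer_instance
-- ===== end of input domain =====

-- B replaces A's single forward pass with its if/elif ladder by five independent backward
-- searches over the stripped lines (last matching line wins per field) — alternative decomposition, same cost.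

-- ===== PORT A =====
def parse_identity_md (content : String) : List (String × String) :=
  let data0 : PySem.Dict String String :=
    PySem.Dict.ofList [("name", ""), ("creature", ""), ("vibe", ""), ("emoji", "🤖"), ("avatar", "")]
  let lines := (PySem.Str.split? content "\n").getD []
  let data := lines.foldl (fun d line0 =>
    let line := PySem.Str.strip line0
    if PySem.Str.startswith line "- **Name:**" then
      d.insert "name" (PySem.Str.strip (PySem.Str.replace line "- **Name:**" ""))
    else if PySem.Str.startswith line "- **Creature:**" then
      d.insert "creature" (PySem.Str.strip (PySem.Str.replace line "- **Creature:**" ""))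
    else if PySem.Str.startswith line "- **Vibe:**" then
      d.insert "vibe" (PySem.Str.strip (PySem.Str.replace line "- **Vibe:**" ""))
    else if PySem.Str.startswith line "- **Emoji:**" then
      d.insert "emoji" (PySem.Str.strip (PySem.Str.replace line "- **Emoji:**" ""))
    else if PySem.Str.startswith line "- **Avatar:**" then
      d.insert "avatar" (PySem.Str.strip (PySem.Str.replace line "- **Avatar:**" ""))
    else d) data0
  data.items

-- ===== PORT B =====
-- B's helper: scan the (already stripped) lines BACKWARDS, return the first match, else the default
def pvLastValue (lines : List String) (prefix_ default_ : String) : String :=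
  match lines.reverse.find? (fun l => PySem.Str.startswith l prefix_) with
  | some l => PySem.Str.strip (PySem.Str.replace l prefix_ "")
  | none => default_

def parse_identity_md_alt (content : String) : List (String × String) :=
  let lines := ((PySem.Str.split? content "\n").getD []).map PySem.Str.strip
  [("name",     pvLastValue lines "- **Name:**" ""),
   ("creature", pvLastValue lines "- **Creature:**" ""),
   ("vibe",     pvLastValue lines "- **Vibe:**" ""),
   ("emoji",    pvLastValue lines "- **Emoji:**" "🤖"),
   ("avatar",   pvLastValue lines "- **Avatar:**" "")]

-- ===== PRECONDITION & SPEC =====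
def Spec_parse_identity_md (content : String) (out : List (String × String)) : Prop := out = parse_identity_md_alt content
instance (content : String) (out : List (String × String)) : Decidable (Spec_parse_identity_md content out) := by unfold Spec_parse_identity_md; infer_instance

-- ===== CLAIM (what is proved, stated in full; the proofs are below) =====
def Claim_equal_parse_identity_md : Prop := ∀ (content : String), Dom_parse_identity_md content → Spec_parse_identity_md content (parse_identity_md content)

-- ===== LEMMAS AND PROOFS =====

-- the five-field dict as a literal
def pvD (a b c e f : String) : PySem.Dict String String :=
  PySem.Dict.ofList [("name", a), ("creature", b), ("vibe", c), ("emoji", e), ("avatar", f)]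

-- "keep the last match" forward fold, per field
def pvG (p : String) (lines : List String) (v : String) : String :=
  lines.foldl (fun acc l =>
    if PySem.Str.startswith l p then PySem.Str.strip (PySem.Str.replace l p "") else acc) v

theorem pvG_cons (p l : String) (ls : List String) (v : String) :
    pvG p (l :: ls) v =
    pvG p ls (if PySem.Str.startswith l p then PySem.Str.strip (PySem.Str.replace l p "") else v) := rfl

theorem pvD_ins_name (a b c e f x : String) : (pvD a b c e f).insert "name" x = pvD x b c e f := rfl
theorem pvD_ins_creature (a b c e f x : String) : (pvD a b c e f).insert "creature" x = pvD a x c e f := rfl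
theorem pvD_ins_vibe (a b c e f x : String) : (pvD a b c e f).insert "vibe" x = pvD a b x e f := rfl
theorem pvD_ins_emoji (a b c e f x : String) : (pvD a b c e f).insert "emoji" x = pvD a b c x f := rfl
theorem pvD_ins_avatar (a b c e f x : String) : (pvD a b c e f).insert "avatar" x = pvD a b c e x := rfl

theorem pvD_items (a b c e f : String) :
    (pvD a b c e f).items =
    [("name", a), ("creature", b), ("vibe", c), ("emoji", e), ("avatar", f)] := rfl

-- strings that are not prefixes of each other cannot both be prefixes of the same line
theorem pv_excl {p : String} (q : String)
    (h : ¬ (p.toList <+: q.toList ∨ q.toList <+: p.toList)) {s : String}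
    (hp : PySem.Str.startswith s p = true) : PySem.Str.startswith s q = false := by
  by_contra hq
  rw [Bool.not_eq_false] at hq
  rw [PySem.Str.startswith_eq, PySem.Chars.startswith_iff] at hp hq
  exact h (List.prefix_or_prefix_of_prefix hp hq)

-- A's forward fold over the dict = five independent "last match wins" folds
theorem pv_fold_eq (lines : List String) : ∀ (a b c e f : String),
    (lines.foldl (fun d line0 =>
      let line := PySem.Str.strip line0
      if PySem.Str.startswith line "- **Name:**" then
        d.insert "name" (PySem.Str.strip (PySem.Str.replace line "- **Name:**" ""))
      else if PySem.Str.startswith line "- **Creature:**" then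
        d.insert "creature" (PySem.Str.strip (PySem.Str.replace line "- **Creature:**" ""))
      else if PySem.Str.startswith line "- **Vibe:**" then
        d.insert "vibe" (PySem.Str.strip (PySem.Str.replace line "- **Vibe:**" ""))
      else if PySem.Str.startswith line "- **Emoji:**" then
        d.insert "emoji" (PySem.Str.strip (PySem.Str.replace line "- **Emoji:**" ""))
      else if PySem.Str.startswith line "- **Avatar:**" then
        d.insert "avatar" (PySem.Str.strip (PySem.Str.replace line "- **Avatar:**" ""))
      else d) (pvD a b c e f)) =
    pvD (pvG "- **Name:**" (lines.map PySem.Str.strip) a)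
        (pvG "- **Creature:**" (lines.map PySem.Str.strip) b)
        (pvG "- **Vibe:**" (lines.map PySem.Str.strip) c)
        (pvG "- **Emoji:**" (lines.map PySem.Str.strip) e)
        (pvG "- **Avatar:**" (lines.map PySem.Str.strip) f) := by
  induction lines with
  | nil => intro a b c e f; rfl
  | cons l ls ih =>
    intro a b c e f
    simp only [List.foldl_cons, List.map_cons]
    cases h1 : PySem.Str.startswith (PySem.Str.strip l) "- **Name:**" with
    | true =>
      have e12 := pv_excl "- **Creature:**" (by decide) h1
      have e13 := pv_excl "- **Vibe:**" (by decide) h1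
      have e14 := pv_excl "- **Emoji:**" (by decide) h1
      have e15 := pv_excl "- **Avatar:**" (by decide) h1
      simp only [h1, e12, e13, e14, e15, pvG_cons, if_true, if_false, pvD_ins_name]
      exact ih _ b c e f
    | false =>
      cases h2 : PySem.Str.startswith (PySem.Str.strip l) "- **Creature:**" with
      | true =>
        have e21 := pv_excl "- **Name:**" (by decide) h2
        have e23 := pv_excl "- **Vibe:**" (by decide) h2
        have e24 := pv_excl "- **Emoji:**" (by decide) h2
        have e25 := pv_excl "- **Avatar:**" (by decide) h2
        simp only [h1, h2, e21, e23, e24, e25, pvG_cons, if_true, if_false, pvD_ins_creature]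
        exact ih a _ c e f
      | false =>
        cases h3 : PySem.Str.startswith (PySem.Str.strip l) "- **Vibe:**" with
        | true =>
          have e31 := pv_excl "- **Name:**" (by decide) h3
          have e32 := pv_excl "- **Creature:**" (by decide) h3
          have e34 := pv_excl "- **Emoji:**" (by decide) h3
          have e35 := pv_excl "- **Avatar:**" (by decide) h3
          simp only [h1, h2, h3, e31, e32, e34, e35, pvG_cons, if_true, if_false, pvD_ins_vibe]
          exact ih a b _ e f
        | false =>
          cases h4 : PySem.Str.startswith (PySem.Str.strip l) "- **Emoji:**" with
          | true =>
            have e41 := pv_excl "- **Name:**" (by decide) h4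
            have e42 := pv_excl "- **Creature:**" (by decide) h4
            have e43 := pv_excl "- **Vibe:**" (by decide) h4
            have e45 := pv_excl "- **Avatar:**" (by decide) h4
            simp only [h1, h2, h3, h4, e41, e42, e43, e45, pvG_cons, if_true, if_false, pvD_ins_emoji]
            exact ih a b c _ f
          | false =>
            cases h5 : PySem.Str.startswith (PySem.Str.strip l) "- **Avatar:**" with
            | true =>
              have e51 := pv_excl "- **Name:**" (by decide) h5
              have e52 := pv_excl "- **Creature:**" (by decide) h5
              have e53 := pv_excl "- **Vibe:**" (by decide) h5
              have e54 := pv_excl "- **Emoji:**" (by decide) h5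
              simp only [h1, h2, h3, h4, h5, e51, e52, e53, e54, pvG_cons, if_true, if_false, pvD_ins_avatar]
              exact ih a b c e _
            | false =>
              simp only [h1, h2, h3, h4, h5, pvG_cons, if_false]
              exact ih a b c e f

theorem pvG_eq_lastValue (p : String) (lines : List String) : ∀ (v : String),
    pvG p lines v = pvLastValue lines p v := by
  induction lines with
  | nil => intro v; rfl
  | cons l ls ih =>
    intro v
    rw [pvG_cons, ih]
    unfold pvLastValue
    rw [List.reverse_cons, List.find?_append]
    cases hf : ls.reverse.find? (fun l => PySem.Str.startswith l p) with
    | some x => simp [Option.or]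
    | none =>
      cases hl : PySem.Str.startswith l p with
      | true =>
        have hlc : PySem.Chars.startswith l.toList p.toList = true := by
          rw [← PySem.Str.startswith_eq]; exact hl
        simp [Option.or, List.find?, hlc]
      | false =>
        have hlc : PySem.Chars.startswith l.toList p.toList = false := by
          rw [← PySem.Str.startswith_eq]; exact hl
        simp [Option.or, List.find?, hlc]

-- ===== VERDICT (by name: the statement is the Claim_ definition above) =====
theorem parse_identity_md_spec : Claim_equal_parse_identity_md := by
  intro content _
  unfold Spec_parse_identity_md
  show parse_identity_md content = parse_identity_md_alt content
  unfold parse_identity_md parse_identity_md_alt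
  simp only [show (PySem.Dict.ofList [("name", ""), ("creature", ""), ("vibe", ""), ("emoji", "🤖"), ("avatar", "")]) = pvD "" "" "" "🤖" "" from rfl,
    pv_fold_eq, pvD_items, pvG_eq_lastValue]
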